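-- pv_equiv track=rewrite | github.com/AnubhavKumarGupta/Python-Practice | Data Structure/final.py | perform_operations
-- ===== SOURCE A (Python) =====
-- def perform_operations(nums, k, multiplier):
--     MOD = 10**9 + 7  # Modulo value
--
--     while k > 0:
--         # Find the index of the first minimum value in the list
--         min_index = nums.index(min(nums))
--         # Replace the selected minimum value with x * multiplier
--         nums[min_index] *= multiplier
--         # Decrease the number of operations
--         k -= 1
--
--     # Apply modulo 10^9 + 7 to each value in nums
--     nums = [x % MOD for x in nums]
--
--     return nums
-- ===== SOURCE B (Python) =====
-- def _insert(pairs, item):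
--     # insert item into the ascending list `pairs`, keeping it sorted
--     for j in range(len(pairs)):
--         if item < pairs[j]:
--             pairs.insert(j, item)
--             return
--     pairs.append(item)
--
--
-- def perform_operations(nums, k, multiplier):
--     MOD = 10**9 + 7
--     if k <= 0 or not nums:
--         return [x % MOD for x in nums]
--     # keep a (value, index) list sorted ascending; the head is always the
--     # first minimum of the current array
--     pairs = []
--     for i, v in enumerate(nums):
--         _insert(pairs, (v, i))
--     while k > 0:
--         v, i = pairs.pop(0)
--         _insert(pairs, (v * multiplier, i))
--         k -= 1
--     res = [0] * len(nums)
--     for v, i in pairs: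
--         res[i] = v % MOD
--     return res
-- ===== Notes on version B (the rewrite author's own statement) =====
-- stated objective: alternative
-- what changed: Instead of rescanning the whole array twice per operation (min then index), B maintains a sorted list of (value, index) pairs, pops its head and re-inserts the multiplied pair each step, then writes the results back by index; Pre_ excludes the empty list with k > 0, on which A raises ValueError (min of empty sequence) while B returns [].
import Mathlib
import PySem

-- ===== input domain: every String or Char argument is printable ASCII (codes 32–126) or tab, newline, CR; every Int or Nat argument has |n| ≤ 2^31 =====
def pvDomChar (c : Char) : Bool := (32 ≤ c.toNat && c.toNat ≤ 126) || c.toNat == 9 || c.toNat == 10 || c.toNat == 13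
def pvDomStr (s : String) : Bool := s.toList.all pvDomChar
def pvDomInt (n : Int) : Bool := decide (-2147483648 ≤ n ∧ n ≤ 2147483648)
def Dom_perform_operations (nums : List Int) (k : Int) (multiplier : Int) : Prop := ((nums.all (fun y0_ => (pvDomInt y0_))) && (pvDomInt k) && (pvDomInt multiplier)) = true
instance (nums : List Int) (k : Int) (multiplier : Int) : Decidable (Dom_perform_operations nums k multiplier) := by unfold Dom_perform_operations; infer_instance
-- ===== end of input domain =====

-- B keeps a sorted (value, index) pair list (pop head / ordered re-insert) instead of
-- rescanning the array for min and its index every iteration; alternative algorithm, same results.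
-- A mutates its list argument in place; the equivalence proved here is about the RETURN value only.

-- ===== PORT A =====
def pvMOD : Int := 1000000007

def pvALoop (multiplier : Int) : Nat → List Int → List Int
  | 0, nums => nums
  | n+1, nums =>
    match PySem.List.min? nums (fun x => x) with
    | none => nums
    | some m =>
      match PySem.List.index? nums m with
      | none => nums
      | some i =>
        match PySem.List.pyGet? nums (Int.ofNat i) with
        | none => nums
        | some x => pvALoop multiplier n (nums.set i (x * multiplier))

def perform_operations (nums : List Int) (k : Int) (multiplier : Int) : List Int :=
  (pvALoop multiplier k.toNat nums).map (fun x => PySem.Int.mod x pvMOD)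

-- ===== PORT B =====
-- Python tuple comparison (v, i) < (w, j): lexicographic
def pvLtP (a b : Int × Int) : Bool := a.1 < b.1 || (a.1 == b.1 && a.2 < b.2)

-- _insert: put item into the ascending list, keeping it sorted
def pvInsert (item : Int × Int) : List (Int × Int) → List (Int × Int)
  | [] => [item]
  | p :: rest => if pvLtP item p then item :: p :: rest else p :: pvInsert item rest

def pvBLoop (multiplier : Int) : Nat → List (Int × Int) → List (Int × Int)
  | 0, ps => ps
  | _+1, [] => []      -- unreachable under Pre_ (pop from an empty list)
  | n+1, (v, i) :: rest => pvBLoop multiplier n (pvInsert (v * multiplier, i) rest)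

-- res = [0]*len(nums); for v, i in pairs: res[i] = v % MOD
def pvRecon (n : Nat) (ps : List (Int × Int)) : List Int :=
  ps.foldl (fun res p => res.set p.2.toNat (PySem.Int.mod p.1 pvMOD)) (List.replicate n 0)

def perform_operations_alt (nums : List Int) (k : Int) (multiplier : Int) : List Int :=
  if k ≤ 0 || nums.isEmpty then nums.map (fun x => PySem.Int.mod x pvMOD)
  else
    pvRecon nums.length
      (pvBLoop multiplier k.toNat
        ((PySem.List.enumerate nums).foldl (fun acc iv => pvInsert (iv.2, iv.1) acc) []))

-- ===== PRECONDITION & SPEC =====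
-- Pre_ excludes only nums = [] with k > 0, where A raises ValueError (min of empty sequence).
def Pre_perform_operations (nums : List Int) (k : Int) (multiplier : Int) : Prop :=
  nums ≠ [] ∨ k ≤ 0
instance (nums : List Int) (k : Int) (multiplier : Int) : Decidable (Pre_perform_operations nums k multiplier) := by unfold Pre_perform_operations; infer_instance

def pvWitness_perform_operations : List Int × Int × Int := ([3, 1, 2], 2, 5)

def Spec_perform_operations (nums : List Int) (k : Int) (multiplier : Int) (out : List Int) : Prop := out = perform_operations_alt nums k multiplier
instance (nums : List Int) (k : Int) (multiplier : Int) (out : List Int) : Decidable (Spec_perform_operations nums k multiplier out) := by unfold Spec_perform_operations; infer_instance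

-- ===== CLAIM (what is proved, stated in full; the proofs are below) =====
def Claim_equal_perform_operations : Prop := ∀ (nums : List Int) (k : Int) (multiplier : Int), Dom_perform_operations nums k multiplier → Pre_perform_operations nums k multiplier → Spec_perform_operations nums k multiplier (perform_operations nums k multiplier)

-- ===== LEMMAS AND PROOFS =====

-- the canonical (value, index) pair list of the current array
def pvAList (nums : List Int) : List (Int × Int) :=
  (PySem.List.enumerate nums).map (fun iv => (iv.2, iv.1))

-- the loop invariant tying A's array to B's sorted pair list
def pvInv (nums : List Int) (ps : List (Int × Int)) : Prop :=
  ps.Pairwise (fun a b => pvLtP a b = true) ∧ ps.Perm (pvAList nums)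

theorem pvLtP_iff (a b : Int × Int) :
    pvLtP a b = true ↔ a.1 < b.1 ∨ (a.1 = b.1 ∧ a.2 < b.2) := by
  simp [pvLtP]

theorem pvLtP_trans {a b c : Int × Int} (h1 : pvLtP a b = true) (h2 : pvLtP b c = true) :
    pvLtP a c = true := by
  rw [pvLtP_iff] at h1 h2 ⊢; omega

theorem pvLtP_total {a b : Int × Int} (h : a ≠ b) :
    pvLtP a b = true ∨ pvLtP b a = true := by
  by_cases h1 : a.1 < b.1
  · exact Or.inl ((pvLtP_iff a b).2 (Or.inl h1))
  by_cases h2 : b.1 < a.1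
  · exact Or.inr ((pvLtP_iff b a).2 (Or.inl h2))
  have he : a.1 = b.1 := le_antisymm (not_lt.1 h2) (not_lt.1 h1)
  have hne2 : a.2 ≠ b.2 := fun hc => h (Prod.ext_iff.2 ⟨he, hc⟩)
  rcases lt_or_gt_of_ne hne2 with h3 | h3
  · exact Or.inl ((pvLtP_iff a b).2 (Or.inr ⟨he, h3⟩))
  · exact Or.inr ((pvLtP_iff b a).2 (Or.inr ⟨he.symm, h3⟩))

theorem pvInsert_perm (a : Int × Int) (l : List (Int × Int)) :
    (pvInsert a l).Perm (a :: l) := by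
  induction l with
  | nil => simp [pvInsert]
  | cons p rest ih =>
    simp only [pvInsert]
    split
    · exact List.Perm.refl _
    · exact (ih.cons p).trans (List.Perm.swap a p rest)

theorem mem_pvInsert {a q : Int × Int} {l : List (Int × Int)} :
    q ∈ pvInsert a l ↔ q = a ∨ q ∈ l := by
  rw [(pvInsert_perm a l).mem_iff]; simp

theorem pvInsert_pairwise {a : Int × Int} {l : List (Int × Int)}
    (hp : l.Pairwise (fun x y => pvLtP x y = true))
    (hne : ∀ p ∈ l, a ≠ p) :
    (pvInsert a l).Pairwise (fun x y => pvLtP x y = true) := by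
  induction l with
  | nil => simp [pvInsert]
  | cons p rest ih =>
    rw [List.pairwise_cons] at hp
    simp only [pvInsert]
    split
    · rename_i hlt
      refine List.pairwise_cons.2 ⟨?_, List.pairwise_cons.2 ⟨hp.1, hp.2⟩⟩
      intro q hq
      rcases List.mem_cons.1 hq with rfl | hq
      · exact hlt
      · exact pvLtP_trans hlt (hp.1 q hq)
    · rename_i hnlt
      have hpa : pvLtP p a = true := by
        rcases pvLtP_total (Ne.symm (hne p (by simp))) with h | h
        · exact h
        · exact absurd h hnlt
      refine List.pairwise_cons.2 ⟨?_, ih hp.2 (fun q hq => hne q (by simp [hq]))⟩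
      intro q hq
      rcases mem_pvInsert.1 hq with rfl | hq
      · exact hpa
      · exact hp.1 q hq

theorem pvAList_length (nums : List Int) : (pvAList nums).length = nums.length := by
  simp [pvAList, PySem.List.length_enumerate]

theorem pvAList_getElem (nums : List Int) (j : Nat) (hj : j < nums.length) :
    (pvAList nums)[j]'(by rw [pvAList_length]; exact hj) = (nums[j], (j : Int)) := by
  simp [pvAList, PySem.List.getElem_enumerate]

theorem mem_pvAList {nums : List Int} {p : Int × Int} :
    p ∈ pvAList nums ↔ ∃ (j : Nat) (h : j < nums.length), p = (nums[j], (j : Int)) := by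
  constructor
  · intro hp
    rcases List.mem_iff_getElem.1 hp with ⟨j, hj, hget⟩
    have hj' : j < nums.length := by rw [pvAList_length] at hj; exact hj
    exact ⟨j, hj', by rw [← hget, pvAList_getElem nums j hj']⟩
  · rintro ⟨j, hj, rfl⟩
    exact List.mem_iff_getElem.2 ⟨j, by rw [pvAList_length]; exact hj,
      pvAList_getElem nums j hj⟩

theorem pvAList_snd_nodup (nums : List Int) :
    ((pvAList nums).map Prod.snd).Nodup := by
  have h := PySem.List.pairwise_lt_enumerate nums 0
  have h2 : (pvAList nums).Pairwise (fun a b => a.2 < b.2) := by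
    unfold pvAList
    exact List.pairwise_map.2 (h.imp (fun hab => hab))
  rw [List.nodup_iff_pairwise_ne]
  exact List.pairwise_map.2 (h2.imp (fun h => by omega))

-- helper: index? from an explicit first-occurrence description
theorem pvIndex?_of_first {nums : List Int} {v : Int} {t : Nat} (ht : t < nums.length)
    (hv : nums[t] = v) (hfst : ∀ j (hj : j < t), nums[j]'(by omega) ≠ v) :
    PySem.List.index? nums v = some t := by
  induction nums generalizing t with
  | nil => simp at ht
  | cons x xs ih =>
    cases t with
    | zero =>
      simp only [List.getElem_cons_zero] at hv
      subst hv
      exact PySem.List.index?_cons_self x xs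
    | succ t' =>
      have hx : x ≠ v := by
        have := hfst 0 (by omega); simpa using this
      rw [PySem.List.index?_cons_of_ne xs hx]
      have hthis := ih (t := t') (by simpa using ht) (by simpa using hv)
        (fun j hj => by have := hfst (j+1) (by omega); simpa using this)
      rw [hthis]
      rfl

theorem pvAList_getElem? (nums : List Int) (p : Nat) :
    (pvAList nums)[p]? = nums[p]?.map (fun x => (x, (p : Int))) := by
  by_cases hp : p < nums.length
  · rw [List.getElem?_eq_getElem (by rw [pvAList_length]; exact hp),
      pvAList_getElem nums p hp, List.getElem?_eq_getElem hp]
    rfl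
  · rw [List.getElem?_eq_none (by rw [pvAList_length]; omega),
      List.getElem?_eq_none (by omega)]
    rfl

-- pvAList of a pointwise update is the pointwise update of pvAList
theorem pvAList_set (nums : List Int) (jt : Nat) (w : Int) :
    pvAList (nums.set jt w) = (pvAList nums).set jt (w, (jt : Int)) := by
  apply List.ext_getElem?
  intro p
  rw [pvAList_getElem?, List.getElem?_set, List.getElem?_set, pvAList_getElem?, pvAList_length]
  by_cases h : jt = p
  · subst h
    by_cases h2 : jt < nums.length <;> simp [h2]
  · simp [h]

-- main step lemma: from the invariant, A's selected element is B's head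
theorem pvStep {nums : List Int} {v i : Int} {rest : List (Int × Int)}
    (hinv : pvInv nums ((v, i) :: rest)) :
    PySem.List.min? nums (fun x => x) = some v ∧
    PySem.List.index? nums v = some i.toNat ∧
    PySem.List.pyGet? nums (Int.ofNat i.toNat) = some v ∧
    ∀ mu : Int, pvInv (nums.set i.toNat (v * mu)) (pvInsert (v * mu, i) rest) := by
  obtain ⟨hpw, hperm⟩ := hinv
  have hmem : (v, i) ∈ pvAList nums := hperm.subset (by simp)
  obtain ⟨jt, hjt, hvi⟩ := mem_pvAList.1 hmem
  rw [Prod.mk.injEq] at hvi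
  obtain ⟨rfl, rfl⟩ := hvi
  have hne : nums ≠ [] := by
    intro h; subst h; simp at hjt
  -- every element of nums appears as a pair in (v,i)::rest
  have hpair : ∀ (j : Nat) (hj : j < nums.length),
      (nums[j], (j : Int)) = (nums[jt], (jt : Int)) ∨ (nums[j], (j : Int)) ∈ rest := by
    intro j hj
    have : (nums[j], (j : Int)) ∈ (nums[jt], (jt : Int)) :: rest :=
      hperm.mem_iff.2 (mem_pvAList.2 ⟨j, hj, rfl⟩)
    exact List.mem_cons.1 this
  have hhead := (List.pairwise_cons.1 hpw).1
  -- v is minimal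
  have hvle : ∀ (j : Nat) (hj : j < nums.length), nums[jt] ≤ nums[j] := by
    intro j hj
    rcases hpair j hj with heq | hin
    · rw [Prod.mk.injEq] at heq; omega
    · have hlt := hhead _ hin
      simp only [pvLtP_iff] at hlt
      omega
  -- and jt is the first index achieving it
  have hfirst : ∀ (j : Nat) (hj : j < jt), nums[j]'(by omega) ≠ nums[jt] := by
    intro j hj heq
    rcases hpair j (by omega) with hcase | hin
    · rw [Prod.mk.injEq] at hcase; omega
    · have hlt := hhead _ hin
      simp only [pvLtP_iff] at hlt
      omega
  have htoNat : ((jt : Int)).toNat = jt := Int.toNat_natCast jt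
  -- min?
  have hmin? : PySem.List.min? nums (fun x => x) = some nums[jt] := by
    cases h : PySem.List.min? nums (fun x => x) with
    | none => exact absurd ((PySem.List.min?_eq_none_iff _ _).1 h) hne
    | some m =>
      have hmmem := PySem.List.min?_mem h
      have hmin := PySem.List.min?_isMin h
      obtain ⟨jm, hjm, hm⟩ := List.mem_iff_getElem.1 hmmem
      have h1 : nums[jt] ≤ m := hm ▸ hvle jm hjm
      have h2 : m ≤ nums[jt] := hmin _ (List.getElem_mem hjt)
      rw [le_antisymm h1 h2]
  refine ⟨hmin?, ?_, ?_, ?_⟩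
  · rw [htoNat]; exact pvIndex?_of_first hjt rfl (fun j hj => hfirst j hj)
  · rw [htoNat]
    exact PySem.List.pyGet?_ofNat nums jt hjt
  · intro mu
    rw [htoNat]
    -- snd-distinctness within the pair list
    have hnd : (((nums[jt], (jt : Int)) :: rest).map Prod.snd).Nodup :=
      ((hperm.map Prod.snd).nodup_iff).2 (pvAList_snd_nodup nums)
    rw [List.map_cons, List.nodup_cons] at hnd
    have hsnd : ∀ p ∈ rest, p.2 ≠ (jt : Int) := by
      intro p hp heq
      have hm : p.2 ∈ rest.map Prod.snd := List.mem_map_of_mem hp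
      rw [heq] at hm
      exact hnd.1 hm
    constructor
    · exact pvInsert_pairwise (List.pairwise_cons.1 hpw).2
        (fun p hp heq => hsnd p hp (by rw [← heq]))
    · -- permutation bookkeeping
      have hjt' : jt < (pvAList nums).length := by rw [pvAList_length]; exact hjt
      have hdecomp : pvAList nums =
          (pvAList nums).take jt ++ (nums[jt], (jt : Int)) :: (pvAList nums).drop (jt+1) := by
        conv_lhs => rw [← List.take_append_drop jt (pvAList nums)]
        congr 1
        rw [← List.getElem_cons_drop hjt', pvAList_getElem nums jt hjt]
      have hrest : rest.Perm ((pvAList nums).take jt ++ (pvAList nums).drop (jt+1)) := by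
        have h1 : ((nums[jt], (jt : Int)) :: rest).Perm
            ((nums[jt], (jt : Int)) :: ((pvAList nums).take jt ++ (pvAList nums).drop (jt+1))) := by
          refine hperm.trans ?_
          conv_lhs => rw [hdecomp]
          exact List.perm_middle
        exact h1.cons_inv
      have hset : pvAList (nums.set jt (nums[jt] * mu)) =
          (pvAList nums).take jt ++ (nums[jt] * mu, (jt : Int)) :: (pvAList nums).drop (jt+1) := by
        rw [pvAList_set, List.set_eq_take_append_cons_drop, if_pos hjt']
      refine (pvInsert_perm _ _).trans ?_
      rw [hset]
      exact ((hrest.cons _).trans List.perm_middle.symm)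

-- one unfolding of A's loop when the scrutinees are known
theorem pvALoop_succ_eq {mult : Int} {n : Nat} {nums : List Int} {v : Int} {iN : Nat}
    (h1 : PySem.List.min? nums (fun x => x) = some v)
    (h2 : PySem.List.index? nums v = some iN)
    (h3 : PySem.List.pyGet? nums (Int.ofNat iN) = some v) :
    pvALoop mult (n+1) nums = pvALoop mult n (nums.set iN (v * mult)) := by
  simp only [pvALoop, h1, h2, h3]

theorem pvLoop_inv (mult : Int) (n : Nat) :
    ∀ (nums : List Int) (ps : List (Int × Int)), nums ≠ [] → pvInv nums ps →
      pvInv (pvALoop mult n nums) (pvBLoop mult n ps) ∧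
      (pvALoop mult n nums).length = nums.length := by
  induction n with
  | zero => intro nums ps _ hinv; exact ⟨hinv, rfl⟩
  | succ n ih =>
    intro nums ps hne hinv
    cases ps with
    | nil =>
      exfalso
      have := hinv.2.length_eq
      rw [pvAList_length] at this
      cases nums with
      | nil => exact hne rfl
      | cons a l => simp at this
    | cons p rest =>
      obtain ⟨v, i⟩ := p
      obtain ⟨h1, h2, h3, h4⟩ := pvStep hinv
      have hinv' := h4 mult
      have hne' : nums.set i.toNat (v * mult) ≠ [] := by
        intro h
        have hlen := congrArg List.length h
        rw [List.length_set] at hlen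
        exact hne (List.length_eq_zero_iff.1 hlen)
      rw [pvALoop_succ_eq h1 h2 h3]
      have := ih _ _ hne' hinv'
      refine ⟨?_, ?_⟩
      · simpa [pvBLoop] using this.1
      · rw [this.2, List.length_set]

-- building the initial sorted pair list
theorem pvFold_perm (e : List (Int × Int)) :
    ∀ (acc : List (Int × Int)),
      (e.foldl (fun a p => pvInsert (p.2, p.1) a) acc).Perm
        ((e.map (fun p => (p.2, p.1))) ++ acc) := by
  induction e with
  | nil => intro acc; simp
  | cons p tl ih =>
    intro acc
    simp only [List.foldl_cons, List.map_cons, List.cons_append]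
    refine (ih _).trans ?_
    refine (List.Perm.append_left _ (pvInsert_perm _ _)).trans ?_
    exact List.perm_middle

theorem pvFold_pairwise (e : List (Int × Int)) :
    ∀ (acc : List (Int × Int)),
      acc.Pairwise (fun x y => pvLtP x y = true) →
      e.Pairwise (fun a b => a.1 ≠ b.1) →
      (∀ p ∈ e, ∀ q ∈ acc, p.1 ≠ q.2) →
      (e.foldl (fun a p => pvInsert (p.2, p.1) a) acc).Pairwise (fun x y => pvLtP x y = true) := by
  induction e with
  | nil => intro acc hacc _ _; simpa using hacc
  | cons p tl ih =>
    intro acc hacc he hsep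
    rw [List.pairwise_cons] at he
    simp only [List.foldl_cons]
    refine ih _ ?_ he.2 ?_
    · exact pvInsert_pairwise hacc
        (fun q hq heq => hsep p (by simp) q hq (congrArg Prod.snd heq))
    · intro p' hp' q hq
      rcases mem_pvInsert.1 hq with rfl | hq
      · exact fun h => (he.1 p' hp') h.symm
      · exact hsep p' (by simp [hp']) q hq

theorem pvBuild_inv (nums : List Int) :
    pvInv nums ((PySem.List.enumerate nums).foldl (fun acc iv => pvInsert (iv.2, iv.1) acc) []) := by
  constructor
  · refine pvFold_pairwise _ [] (by simp) ?_ (by simp)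
    exact (PySem.List.pairwise_lt_enumerate nums 0).imp (fun h => by omega)
  · have := pvFold_perm (PySem.List.enumerate nums) []
    simpa [pvAList] using this

-- the reconstruction loop, cell by cell
theorem pvRecon_get (ps : List (Int × Int)) :
    ∀ (init : List Int) (j : Nat),
      ((ps.map Prod.snd).Nodup) →
      (∀ p ∈ ps, 0 ≤ p.2 ∧ p.2.toNat < init.length) →
      (ps.foldl (fun res p => res.set p.2.toNat (PySem.Int.mod p.1 pvMOD)) init)[j]? =
        match ps.find? (fun p => p.2 == (j : Int)) with
        | some p => some (PySem.Int.mod p.1 pvMOD)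
        | none => init[j]? := by
  induction ps with
  | nil => intro init j _ _; rfl
  | cons p tl ih =>
    intro init j hnd hrange
    rw [List.map_cons, List.nodup_cons] at hnd
    have hp := hrange p (by simp)
    simp only [List.foldl_cons]
    by_cases hpj : p.2 = (j : Int)
    · have hfind : (p :: tl).find? (fun p => p.2 == (j : Int)) = some p :=
        List.find?_cons_of_pos (by simp [hpj])
      have htl : tl.find? (fun p => p.2 == (j : Int)) = none := by
        rw [List.find?_eq_none]
        intro q hq
        simp only [beq_iff_eq]
        intro hq2
        apply hnd.1
        have hm : q.2 ∈ List.map Prod.snd tl := List.mem_map_of_mem hq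
        rw [hq2, ← hpj] at hm
        exact hm
      rw [ih _ j hnd.2 (fun q hq => by
        have := hrange q (by simp [hq]); rwa [List.length_set])]
      rw [htl, hfind]
      show (init.set p.2.toNat (PySem.Int.mod p.1 pvMOD))[j]? = some (PySem.Int.mod p.1 pvMOD)
      have hjt : p.2.toNat = j := by omega
      rw [hjt]
      exact List.getElem?_set_self (by omega)
    · have hfind : (p :: tl).find? (fun p => p.2 == (j : Int)) =
          tl.find? (fun p => p.2 == (j : Int)) :=
        List.find?_cons_of_neg (by simp [hpj])
      rw [ih _ j hnd.2 (fun q hq => by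
        have := hrange q (by simp [hq]); rwa [List.length_set])]
      rw [hfind]
      cases htl : tl.find? (fun p => p.2 == (j : Int)) with
      | some q => rfl
      | none =>
        show (init.set p.2.toNat (PySem.Int.mod p.1 pvMOD))[j]? = init[j]?
        exact List.getElem?_set_ne (by omega)

theorem pvRecon_eq {nums : List Int} {ps : List (Int × Int)} (hinv : pvInv nums ps) :
    pvRecon nums.length ps = nums.map (fun x => PySem.Int.mod x pvMOD) := by
  obtain ⟨_, hperm⟩ := hinv
  have hnd : (ps.map Prod.snd).Nodup :=
    ((hperm.map Prod.snd).nodup_iff).2 (pvAList_snd_nodup nums)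
  have hmemps : ∀ p ∈ ps, ∃ (j : Nat) (h : j < nums.length), p = (nums[j], (j : Int)) :=
    fun p hp => mem_pvAList.1 (hperm.subset hp)
  have hrange : ∀ p ∈ ps, 0 ≤ p.2 ∧ p.2.toNat < (List.replicate nums.length (0:Int)).length := by
    intro p hp
    obtain ⟨j, hj, rfl⟩ := hmemps p hp
    simp [hj]
  apply List.ext_getElem?
  intro j
  unfold pvRecon
  rw [pvRecon_get ps _ j hnd hrange]
  by_cases hj : j < nums.length
  · have hex : ∃ q ∈ ps, (q.2 == (j : Int)) = true := by
      refine ⟨(nums[j], (j : Int)), hperm.mem_iff.2 (mem_pvAList.2 ⟨j, hj, rfl⟩), by simp⟩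
    cases hfq : ps.find? (fun p => p.2 == (j : Int)) with
    | none =>
      exfalso
      rw [List.find?_eq_none] at hfq
      obtain ⟨q, hqm, hqp⟩ := hex
      exact hfq q hqm hqp
    | some q =>
      have hqmem := List.mem_of_find?_eq_some hfq
      have hqpred := List.find?_some hfq
      obtain ⟨j', hj', hq⟩ := hmemps q hqmem
      have hjj : j' = j := by
        rw [hq] at hqpred; simp at hqpred; omega
      subst hjj
      rw [hq]
      simp [List.getElem?_eq_getElem hj]
  · have hfnone : ps.find? (fun p => p.2 == (j : Int)) = none := by
      rw [List.find?_eq_none]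
      intro q hq
      obtain ⟨j', hj', rfl⟩ := hmemps q hq
      simp only [beq_iff_eq]
      intro h
      omega
    rw [hfnone]
    show (List.replicate nums.length (0:Int))[j]? = (nums.map (fun x => PySem.Int.mod x pvMOD))[j]?
    rw [List.getElem?_eq_none (by simp only [List.length_replicate]; omega),
      List.getElem?_eq_none (by rw [List.length_map]; omega)]

-- ===== VERDICT (by name: the statement is the Claim_ definition above) =====
theorem perform_operations_spec : Claim_equal_perform_operations := by
  intro nums k mult _ hpre
  unfold Spec_perform_operations perform_operations perform_operations_alt
  by_cases hk : k ≤ 0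
  · rw [Int.toNat_of_nonpos hk]
    simp [pvALoop, hk]
  · have hne : nums ≠ [] := by
      rcases hpre with h | h
      · exact h
      · exact absurd h hk
    have hkn : ¬((k ≤ 0 || nums.isEmpty) = true) := by
      simp [hk, List.isEmpty_iff, hne]
    rw [if_neg hkn]
    have hmain := pvLoop_inv mult k.toNat nums _ hne (pvBuild_inv nums)
    rw [← hmain.2]
    exact (pvRecon_eq hmain.1).symm
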